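-- pv_equiv track=rewrite | github.com/Parkyunhwan/BaekJoon | 21_05/TEST/CLNGS/4.py | solution
-- ===== SOURCE A (Python) =====
-- from collections import defaultdict
--
-- def union_parent(parent, a, b):
--     x = find_parent(parent, a)
--     y = find_parent(parent, b)
--     if x == y:
--         return False # cycle
--     if x > y:
--         parent[x] = y
--     elif x < y:
--         parent[y] = x
--     return True
--
-- def find_parent(parent, x):
--     if parent[x] != x:
--         parent[x] = find_parent(parent, parent[x])
--     return parent[x]
--
-- def solution(before, after):
--     length = len(before)
--
--     parent = defaultdict(str)
--     count = 0
--     for i in range(length):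
--         if before[i] not in parent:
--             parent[before[i]] = before[i]
--         if after[i] not in parent:
--             parent[after[i]] = after[i]
--         if before[i] == after[i]:
--             continue
--         if union_parent(parent, before[i], after[i]):
--             count += 1
--         else:
--             count += 2
--
--     return count
-- ===== SOURCE B (Python) =====
-- def solution(before, after):
--     # quick-find: rep maps each seen element to its class representative (the class minimum)
--     rep = {}
--     count = 0
--     for b, a in zip(before, after):
--         if b == a:
--             continue
--         rb = rep.get(b, b)
--         ra = rep.get(a, a)
--         if rb == ra:
--             count += 2
--         else:
--             lo, hi = (rb, ra) if rb < ra else (ra, rb)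
--             rep = {k: (lo if v == hi else v) for k, v in rep.items()}
--             rep[b] = lo
--             rep[a] = lo
--             count += 1
--     return count
-- ===== Notes on version B (the rewrite author's own statement) =====
-- stated objective: simpler
-- what changed: Replaced the recursive union-find (parent dict, recursive find with path compression, root tie-break) by an eager quick-find: a flat dict mapping each element to its class representative, rebuilt by one comprehension at each merge, so the count is read directly off representative equality with no recursion.
import Mathlib
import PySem

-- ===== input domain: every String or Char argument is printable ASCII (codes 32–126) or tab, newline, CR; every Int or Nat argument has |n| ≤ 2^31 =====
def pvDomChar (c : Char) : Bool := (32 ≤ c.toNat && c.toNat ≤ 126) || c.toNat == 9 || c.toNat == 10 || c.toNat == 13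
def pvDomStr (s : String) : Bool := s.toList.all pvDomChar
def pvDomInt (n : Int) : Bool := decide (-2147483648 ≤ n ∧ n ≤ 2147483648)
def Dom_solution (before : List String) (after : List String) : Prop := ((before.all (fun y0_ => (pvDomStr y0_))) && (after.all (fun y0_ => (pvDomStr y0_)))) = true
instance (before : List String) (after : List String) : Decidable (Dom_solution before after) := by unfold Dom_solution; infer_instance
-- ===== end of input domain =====

-- B replaces A's recursive union-find by an eager quick-find representative map (simpler, no recursion); return value only, A's dict mutation is internal.

-- ===== PORT A =====
-- `parent[x]` on the defaultdict(str): returns the stored value, inserting "" when the key is missing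
def ddGet (p : PySem.Dict String String) (x : String) : PySem.Dict String String × String :=
  match p.get? x with
  | some v => (p, v)
  | none => (p.insert x "", "")

-- find_parent with path compression; the fuel only bounds the recursion depth (callers pass
-- size+1, which is never exhausted since parent chains visit distinct keys in decreasing order)
def findParent : Nat → PySem.Dict String String → String → PySem.Dict String String × String
  | 0, p, _ => (p, "")
  | f+1, p, x =>
    let q := ddGet p x
    if q.2 ≠ x then
      let r := findParent f q.1 q.2
      (r.1.insert x r.2, r.2)
    else
      (q.1, q.2)

def unionParent (p : PySem.Dict String String) (a b : String) : PySem.Dict String String × Bool :=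
  let fx := findParent (p.size + 1) p a
  let fy := findParent (fx.1.size + 1) fx.1 b
  let x := fx.2
  let y := fy.2
  if x = y then (fy.1, false)
  else if y.toList < x.toList then (fy.1.insert x y, true)  -- x > y: Python's str '>' is '<' on toList (PYSEM str COMPARISON)
  else if x.toList < y.toList then (fy.1.insert y x, true)
  else (fy.1, true)

def solutionStepA (st : PySem.Dict String String × Int) (bi ai : String) :
    PySem.Dict String String × Int :=
  let p0 := st.1
  let p1 := if p0.contains bi then p0 else p0.insert bi bi
  let p2 := if p1.contains ai then p1 else p1.insert ai ai
  if bi = ai then (p2, st.2)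
  else
    let u := unionParent p2 bi ai
    if u.2 then (u.1, st.2 + 1) else (u.1, st.2 + 2)

def solution (before : List String) (after : List String) : Int :=
  -- for i in range(len(before)); after[i] raises IndexError when len(after) < len(before) (excluded by Pre_), so pyGetD's default is never read inside Pre_
  ((List.range before.length).foldl
    (fun st (i : Nat) => solutionStepA st (PySem.List.pyGetD before (i : Int) "") (PySem.List.pyGetD after (i : Int) ""))
    (PySem.Dict.empty, 0)).2

-- ===== PORT B =====
def solutionStepB (st : PySem.Dict String String × Int) (b a : String) :
    PySem.Dict String String × Int :=
  if b = a then st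
  else
    let rep := st.1
    let rb := rep.getD b b
    let ra := rep.getD a a
    if rb = ra then (rep, st.2 + 2)
    else
      let lo := if rb.toList < ra.toList then rb else ra  -- Python str '<' = '<' on toList
      let hi := if rb.toList < ra.toList then ra else rb
      let rep1 := PySem.Dict.mk (rep.items.map (fun kv => (kv.1, if kv.2 = hi then lo else kv.2)))
      ((rep1.insert b lo).insert a lo, st.2 + 1)

def solution_alt (before : List String) (after : List String) : Int :=
  ((before.zip after).foldl (fun st p => solutionStepB st p.1 p.2) (PySem.Dict.empty, 0)).2

-- ===== PRECONDITION & SPEC =====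
-- Pre_ excludes exactly the inputs where A raises IndexError (after shorter than before)
def Pre_solution (before : List String) (after : List String) : Prop :=
  before.length ≤ after.length
instance (before : List String) (after : List String) : Decidable (Pre_solution before after) := by
  unfold Pre_solution; infer_instance

def pvWitness_solution : List String × List String := (["a", "b", "a"], ["b", "c", "c"])

def Spec_solution (before : List String) (after : List String) (out : Int) : Prop := out = solution_alt before after
instance (before : List String) (after : List String) (out : Int) : Decidable (Spec_solution before after out) := by unfold Spec_solution; infer_instance

-- ===== CLAIM (what is proved, stated in full; the proofs are below) =====
def Claim_equal_solution : Prop := ∀ (before : List String) (after : List String), Dom_solution before after → Pre_solution before after → Spec_solution before after (solution before after)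

-- ===== LEMMAS AND PROOFS =====

-- string order as the ports use it (Python's str '<'; kernel-reducible, unlike String.lt's instance)
abbrev sLt (a b : String) : Prop := a.toList < b.toList
abbrev sLe (a b : String) : Prop := a.toList ≤ b.toList

-- the root of x in the parent forest, computed with enough fuel (size+1 always suffices under PInv)
def rootF : Nat → PySem.Dict String String → String → String
  | 0, _, x => x
  | f+1, p, x =>
    let px := p.getD x x
    if px = x then x else rootF f p px

def Root (p : PySem.Dict String String) (x : String) : String := rootF (p.size + 1) p x

-- forest invariant of A's parent dict: unique keys, every stored value is a key and is ≤ its key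
def PInv (p : PySem.Dict String String) : Prop :=
  p.keys.Nodup ∧ ∀ k v, p.get? k = some v → sLe v k ∧ p.contains v = true

-- measure: number of keys strictly below x
def keysBelow (p : PySem.Dict String String) (x : String) : Nat :=
  (p.keys.filter (fun k => decide (sLt k x))).length

theorem sLt_ne {a b : String} (h : sLt a b) : a ≠ b := by
  intro he; subst he; exact lt_irrefl _ h

theorem sLt_of_sLe_ne {a b : String} (h : sLe a b) (hne : a ≠ b) : sLt a b :=
  lt_of_le_of_ne h (fun hc => hne (String.toList_inj.mp hc))

theorem keysBelow_lt (p : PySem.Dict String String) {x r : String}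
    (hr : r ∈ p.keys) (hlt : sLt r x) : keysBelow p r < keysBelow p x := by
  unfold keysBelow
  have hsub : p.keys.filter (fun k => decide (sLt k r)) =
      (p.keys.filter (fun k => decide (sLt k x))).filter (fun k => decide (sLt k r)) := by
    rw [List.filter_filter]
    apply (List.filter_congr _).symm
    intro a _
    by_cases h : sLt a r
    · simp [h, lt_trans h hlt]
    · simp [h]
  have hsl : (p.keys.filter (fun k => decide (sLt k r))).Sublist
      (p.keys.filter (fun k => decide (sLt k x))) := by
    rw [hsub]; exact List.filter_sublist
  rcases Nat.lt_or_ge (p.keys.filter (fun k => decide (sLt k r))).length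
      (p.keys.filter (fun k => decide (sLt k x))).length with h | h
  · exact h
  · exfalso
    have heq := hsl.eq_of_length (Nat.le_antisymm hsl.length_le h)
    have hrmem : r ∈ p.keys.filter (fun k => decide (sLt k x)) :=
      List.mem_filter.mpr ⟨hr, by simpa using hlt⟩
    rw [← heq] at hrmem
    have h2 := (List.mem_filter.mp hrmem).2
    simp only [decide_eq_true_eq] at h2
    exact lt_irrefl _ h2

theorem keysBelow_le_size (p : PySem.Dict String String) (x : String) :
    keysBelow p x ≤ p.size := by
  unfold keysBelow
  calc (p.keys.filter (fun k => decide (sLt k x))).length ≤ p.keys.length :=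
        List.length_filter_le _ _
    _ = p.size := by simp only [PySem.Dict.keys, PySem.Dict.size, List.length_map]

theorem get?_of_getD_ne (p : PySem.Dict String String) (x : String)
    (h : p.getD x x ≠ x) : p.get? x = some (p.getD x x) := by
  rcases hg : p.get? x with _ | v
  · exact absurd (by rw [PySem.Dict.getD_eq_get?_getD, hg]; rfl) h
  · rw [PySem.Dict.getD_eq_get?_getD, hg]; rfl

theorem step_lt (p : PySem.Dict String String) (hp : PInv p) (x : String)
    (h : p.getD x x ≠ x) :
    sLt (p.getD x x) x ∧ p.contains (p.getD x x) = true ∧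
      keysBelow p (p.getD x x) < keysBelow p x := by
  have hget := get?_of_getD_ne p x h
  obtain ⟨hle, hc⟩ := hp.2 x (p.getD x x) hget
  have hlt : sLt (p.getD x x) x := sLt_of_sLe_ne hle h
  exact ⟨hlt, hc, keysBelow_lt p ((PySem.Dict.contains_iff_mem_keys p (p.getD x x)).mp hc) hlt⟩

theorem rootF_stable (p : PySem.Dict String String) (hp : PInv p) :
    ∀ n (x : String) (f g : Nat), keysBelow p x ≤ n → keysBelow p x < f → keysBelow p x < g →
      rootF f p x = rootF g p x := by
  intro n
  induction n with
  | zero =>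
    intro x f g hn hf hg
    match f, g with
    | f+1, g+1 =>
      simp only [rootF]
      by_cases hpx : p.getD x x = x
      · simp [hpx]
      · exact absurd (step_lt p hp x hpx).2.2 (by omega)
  | succ n ih =>
    intro x f g hn hf hg
    match f, g with
    | f+1, g+1 =>
      simp only [rootF]
      by_cases hpx : p.getD x x = x
      · simp [hpx]
      · obtain ⟨_, _, hm⟩ := step_lt p hp x hpx
        simp only [if_neg hpx]
        exact ih (p.getD x x) f g (by omega) (by omega) (by omega)

theorem rootF_eq_Root (p : PySem.Dict String String) (hp : PInv p) (x : String) (f : Nat)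
    (hf : keysBelow p x < f) : rootF f p x = Root p x := by
  have hsz := keysBelow_le_size p x
  exact rootF_stable p hp (keysBelow p x) x f (p.size + 1) le_rfl hf (by omega)

theorem Root_unfold (p : PySem.Dict String String) (hp : PInv p) (x : String) :
    Root p x = (if p.getD x x = x then x else Root p (p.getD x x)) := by
  by_cases hpx : p.getD x x = x
  · simp [Root, rootF, hpx]
  · obtain ⟨_, _, hm⟩ := step_lt p hp x hpx
    have hsz := keysBelow_le_size p x
    simp only [Root, rootF, if_neg hpx]
    exact rootF_eq_Root p hp (p.getD x x) p.size (by omega)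

theorem Root_le (p : PySem.Dict String String) (hp : PInv p) (x : String) : sLe (Root p x) x := by
  have H : ∀ n x, keysBelow p x ≤ n → sLe (Root p x) x := by
    intro n
    induction n with
    | zero =>
      intro x hn
      rw [Root_unfold p hp x]
      by_cases hpx : p.getD x x = x
      · simp [hpx, sLe]
      · exact absurd (step_lt p hp x hpx).2.2 (by omega)
    | succ n ih =>
      intro x hn
      rw [Root_unfold p hp x]
      by_cases hpx : p.getD x x = x
      · simp [hpx, sLe]
      · obtain ⟨hlt, _, hm⟩ := step_lt p hp x hpx
        simp only [if_neg hpx]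
        exact le_trans (ih (p.getD x x) (by omega)) (le_of_lt hlt)
  exact H (keysBelow p x) x le_rfl

theorem Root_mem (p : PySem.Dict String String) (hp : PInv p) (x : String)
    (hx : p.contains x = true) : p.contains (Root p x) = true := by
  have H : ∀ n x, keysBelow p x ≤ n → p.contains x = true → p.contains (Root p x) = true := by
    intro n
    induction n with
    | zero =>
      intro x hn hx
      rw [Root_unfold p hp x]
      by_cases hpx : p.getD x x = x
      · simpa [hpx]
      · exact absurd (step_lt p hp x hpx).2.2 (by omega)
    | succ n ih =>
      intro x hn hx
      rw [Root_unfold p hp x]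
      by_cases hpx : p.getD x x = x
      · simpa [hpx]
      · obtain ⟨_, hc, hm⟩ := step_lt p hp x hpx
        simp only [if_neg hpx]
        exact ih (p.getD x x) (by omega) hc
  exact H (keysBelow p x) x le_rfl hx

theorem Root_fix (p : PySem.Dict String String) (hp : PInv p) (x : String) :
    p.getD (Root p x) (Root p x) = Root p x := by
  have H : ∀ n x, keysBelow p x ≤ n → p.getD (Root p x) (Root p x) = Root p x := by
    intro n
    induction n with
    | zero =>
      intro x hn
      rw [Root_unfold p hp x]
      by_cases hpx : p.getD x x = x
      · simp [hpx]
      · exact absurd (step_lt p hp x hpx).2.2 (by omega)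
    | succ n ih =>
      intro x hn
      rw [Root_unfold p hp x]
      by_cases hpx : p.getD x x = x
      · simp [hpx]
      · obtain ⟨_, _, hm⟩ := step_lt p hp x hpx
        simp only [if_neg hpx]
        exact ih (p.getD x x) (by omega)
  exact H (keysBelow p x) x le_rfl

theorem Root_eq_self_of_getD (p : PySem.Dict String String) (hp : PInv p) (x : String)
    (h : p.getD x x = x) : Root p x = x := by
  rw [Root_unfold p hp x, if_pos h]

theorem Root_of_not_contains (p : PySem.Dict String String) (x : String)
    (hx : p.contains x = false) : Root p x = x := by
  show rootF (p.size + 1) p x = x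
  simp [rootF, PySem.Dict.getD_of_not_contains p x hx]

theorem kb_induction (p' : PySem.Dict String String) (P : String → Prop)
    (step : ∀ z, (∀ w, keysBelow p' w < keysBelow p' z → P w) → P z) : ∀ z, P z := by
  have H : ∀ n z, keysBelow p' z ≤ n → P z := by
    intro n
    induction n with
    | zero => exact fun z hn => step z (fun w hw => absurd hw (by omega))
    | succ n ih => exact fun z hn => step z (fun w hw => ih w (by omega))
  exact fun z => H (keysBelow p' z) z le_rfl

theorem contains_congr_of_keys_eq (p p' : PySem.Dict String String)
    (h : p'.keys = p.keys) (k : String) : p'.contains k = p.contains k := by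
  rcases hc : p.contains k with _ | _
  · rcases hc' : p'.contains k with _ | _
    · rfl
    · exact absurd ((PySem.Dict.contains_iff_mem_keys p k).mpr
        (h ▸ (PySem.Dict.contains_iff_mem_keys p' k).mp hc')) (by simp [hc])
  · exact (PySem.Dict.contains_iff_mem_keys p' k).mpr
      (h ▸ (PySem.Dict.contains_iff_mem_keys p k).mp hc)

-- inserting a fresh singleton x ↦ x preserves the invariant and every root
theorem insert_fresh_spec (p : PySem.Dict String String) (hp : PInv p) (x : String)
    (hx : p.contains x = false) :
    PInv (p.insert x x) ∧ (∀ z, Root (p.insert x x) z = Root p z) := by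
  have hxk : x ∉ p.keys := fun hm => by
    simp [(PySem.Dict.contains_iff_mem_keys p x).mpr hm] at hx
  have hkeys : (p.insert x x).keys = p.keys ++ [x] :=
    PySem.Dict.keys_insert_of_not_contains p x hx
  have hpinv : PInv (p.insert x x) := by
    constructor
    · rw [hkeys]
      refine hp.1.append (List.nodup_singleton x) ?_
      intro a ha hb
      rw [List.mem_singleton] at hb
      exact absurd (hb ▸ ha) hxk
    · intro k v hg
      rw [PySem.Dict.get?_insert] at hg
      by_cases hk : k = x
      · rw [if_pos hk] at hg
        injection hg with hv
        rw [hk, ← hv]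
        exact ⟨le_refl _, by rw [PySem.Dict.contains_insert]; simp⟩
      · rw [if_neg hk] at hg
        obtain ⟨h1, h2⟩ := hp.2 k v hg
        exact ⟨h1, by rw [PySem.Dict.contains_insert]; simp [h2]⟩
  refine ⟨hpinv, ?_⟩
  apply kb_induction (p.insert x x) (fun z => Root (p.insert x x) z = Root p z)
  intro z ih
  by_cases hz : z = x
  · subst hz
    rw [Root_eq_self_of_getD _ hpinv z (by rw [PySem.Dict.getD_insert]; simp),
      Root_of_not_contains p z hx]
  · have hgd : (p.insert x x).getD z z = p.getD z z := by
      rw [PySem.Dict.getD_insert, if_neg hz]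
    by_cases hpz : p.getD z z = z
    · rw [Root_eq_self_of_getD _ hpinv z (by rw [hgd]; exact hpz),
        Root_eq_self_of_getD p hp z hpz]
    · obtain ⟨_, _, hm⟩ := step_lt (p.insert x x) hpinv z (by rw [hgd]; exact hpz)
      rw [hgd] at hm
      rw [Root_unfold _ hpinv z, Root_unfold p hp z, hgd, if_neg hpz, if_neg hpz]
      exact ih (p.getD z z) hm

-- inserting x ↦ Root p x (path compression) preserves the invariant, keys and every root
theorem insert_root_spec (p : PySem.Dict String String) (hp : PInv p) (x : String)
    (hx : p.contains x = true) :
    PInv (p.insert x (Root p x)) ∧ (p.insert x (Root p x)).keys = p.keys ∧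
      (∀ z, Root (p.insert x (Root p x)) z = Root p z) := by
  set r := Root p x with hr
  have hkeys : (p.insert x r).keys = p.keys := PySem.Dict.keys_insert_of_contains p r hx
  have hcont : ∀ k, (p.insert x r).contains k = p.contains k :=
    contains_congr_of_keys_eq p _ hkeys
  have hpinv : PInv (p.insert x r) := by
    constructor
    · rw [hkeys]; exact hp.1
    · intro k v hg
      rw [PySem.Dict.get?_insert] at hg
      by_cases hk : k = x
      · rw [if_pos hk] at hg
        injection hg with hv
        rw [hk, ← hv]
        exact ⟨Root_le p hp x, by rw [hcont]; exact Root_mem p hp x hx⟩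
      · rw [if_neg hk] at hg
        obtain ⟨h1, h2⟩ := hp.2 k v hg
        exact ⟨h1, by rw [hcont]; exact h2⟩
  refine ⟨hpinv, hkeys, ?_⟩
  apply kb_induction (p.insert x r) (fun z => Root (p.insert x r) z = Root p z)
  intro z ih
  by_cases hz : z = x
  · subst hz
    by_cases hrx : r = z
    · rw [Root_eq_self_of_getD _ hpinv z (by rw [PySem.Dict.getD_insert]; simp [hrx]), ← hr, hrx]
    · have hlt : sLt r z := sLt_of_sLe_ne (Root_le p hp z) hrx
      have hrk : r ∈ (p.insert z r).keys := by
        rw [← PySem.Dict.contains_iff_mem_keys, hcont]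
        exact Root_mem p hp z hx
      have hgd : (p.insert z r).getD z z = r := by rw [PySem.Dict.getD_insert]; simp
      rw [Root_unfold _ hpinv z, hgd, if_neg hrx,
        ih r (keysBelow_lt (p.insert z r) hrk hlt),
        Root_eq_self_of_getD p hp r (Root_fix p hp z)]
  · have hgd : (p.insert x r).getD z z = p.getD z z := by
      rw [PySem.Dict.getD_insert, if_neg hz]
    by_cases hpz : p.getD z z = z
    · rw [Root_eq_self_of_getD _ hpinv z (by rw [hgd]; exact hpz),
        Root_eq_self_of_getD p hp z hpz]
    · obtain ⟨_, _, hm⟩ := step_lt (p.insert x r) hpinv z (by rw [hgd]; exact hpz)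
      rw [hgd] at hm
      rw [Root_unfold _ hpinv z, Root_unfold p hp z, hgd, if_neg hpz, if_neg hpz]
      exact ih (p.getD z z) hm

-- re-pointing a root x to a smaller root y merges: every root equal to x becomes y
theorem insert_repoint_spec (p : PySem.Dict String String) (hp : PInv p) (x y : String)
    (hx : p.contains x = true) (hy : p.contains y = true)
    (hxr : p.getD x x = x) (hyr : p.getD y y = y) (hlt : sLt y x) :
    PInv (p.insert x y) ∧ (p.insert x y).keys = p.keys ∧
      (∀ z, Root (p.insert x y) z = if Root p z = x then y else Root p z) := by
  have hyx : y ≠ x := sLt_ne hlt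
  have hkeys : (p.insert x y).keys = p.keys := PySem.Dict.keys_insert_of_contains p y hx
  have hcont : ∀ k, (p.insert x y).contains k = p.contains k :=
    contains_congr_of_keys_eq p _ hkeys
  have hpinv : PInv (p.insert x y) := by
    constructor
    · rw [hkeys]; exact hp.1
    · intro k v hg
      rw [PySem.Dict.get?_insert] at hg
      by_cases hk : k = x
      · rw [if_pos hk] at hg
        injection hg with hv
        rw [hk, ← hv]
        exact ⟨le_of_lt hlt, by rw [hcont]; exact hy⟩
      · rw [if_neg hk] at hg
        obtain ⟨h1, h2⟩ := hp.2 k v hg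
        exact ⟨h1, by rw [hcont]; exact h2⟩
  refine ⟨hpinv, hkeys, ?_⟩
  apply kb_induction (p.insert x y)
    (fun z => Root (p.insert x y) z = if Root p z = x then y else Root p z)
  intro z ih
  by_cases hz : z = x
  · subst hz
    have hgd : (p.insert z y).getD z z = y := by rw [PySem.Dict.getD_insert]; simp
    have hgy : (p.insert z y).getD y y = y := by
      rw [PySem.Dict.getD_insert, if_neg hyx]; exact hyr
    rw [Root_unfold _ hpinv z, hgd, if_neg hyx, Root_eq_self_of_getD _ hpinv y hgy,
      Root_eq_self_of_getD p hp z hxr, if_pos rfl]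
  · have hgd : (p.insert x y).getD z z = p.getD z z := by
      rw [PySem.Dict.getD_insert, if_neg hz]
    by_cases hpz : p.getD z z = z
    · rw [Root_eq_self_of_getD _ hpinv z (by rw [hgd]; exact hpz),
        Root_eq_self_of_getD p hp z hpz, if_neg hz]
    · obtain ⟨_, _, hm⟩ := step_lt (p.insert x y) hpinv z (by rw [hgd]; exact hpz)
      rw [hgd] at hm
      rw [Root_unfold _ hpinv z, hgd, if_neg hpz,
        ih (p.getD z z) hm, Root_unfold p hp z, if_neg hpz]

theorem findParent_spec (f : Nat) (p : PySem.Dict String String) (x : String)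
    (hp : PInv p) (hx : p.contains x = true) (hf : keysBelow p x < f) :
    (findParent f p x).2 = Root p x ∧ PInv (findParent f p x).1 ∧
      (findParent f p x).1.keys = p.keys ∧
      (∀ z, Root (findParent f p x).1 z = Root p z) := by
  induction f generalizing p x with
  | zero => omega
  | succ f ih =>
    have hget : p.get? x = some (p.getD x x) := by
      rcases hg : p.get? x with _ | v
      · exact absurd ((PySem.Dict.contains_iff_mem_keys p x).mp hx)
          ((PySem.Dict.get?_eq_none_iff_not_mem_keys p x).mp hg)
      · rw [PySem.Dict.getD_eq_get?_getD, hg]; rfl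
    have hdd : ddGet p x = (p, p.getD x x) := by rw [ddGet, hget]
    by_cases hpx : p.getD x x = x
    · have hres : findParent (f+1) p x = (p, p.getD x x) := by
        simp only [findParent, hdd]
        rw [if_neg (by simp [hpx])]
      rw [hres]
      refine ⟨?_, hp, rfl, fun z => rfl⟩
      rw [hpx]
      exact (Root_eq_self_of_getD p hp x hpx).symm
    · obtain ⟨hlt, hc, hm⟩ := step_lt p hp x hpx
      have hrec := ih p (p.getD x x) hp hc (by omega)
      have hres : findParent (f+1) p x =
          ((findParent f p (p.getD x x)).1.insert x (findParent f p (p.getD x x)).2,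
            (findParent f p (p.getD x x)).2) := by
        simp only [findParent, hdd]
        rw [if_pos (by simp [hpx])]
      obtain ⟨hv, hp1, hk1, hr1⟩ := hrec
      have hroot : Root p x = Root p (p.getD x x) := by
        rw [Root_unfold p hp x, if_neg hpx]
      have hcx1 : (findParent f p (p.getD x x)).1.contains x = true := by
        rw [contains_congr_of_keys_eq p _ hk1]; exact hx
      have hrt1 : (findParent f p (p.getD x x)).2 = Root (findParent f p (p.getD x x)).1 x := by
        rw [hv, hr1 x, hroot]
      obtain ⟨hp2, hk2, hr2⟩ := by
        have := insert_root_spec (findParent f p (p.getD x x)).1 hp1 x hcx1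
        rwa [← hrt1] at this
      rw [hres]
      refine ⟨by rw [hv, ← hroot], hp2, by rw [hk2, hk1], fun z => by rw [hr2 z, hr1 z]⟩

theorem unionParent_spec (p : PySem.Dict String String) (a b : String)
    (hp : PInv p) (ha : p.contains a = true) (hb : p.contains b = true) :
    PInv (unionParent p a b).1 ∧ (unionParent p a b).1.keys = p.keys ∧
      ((unionParent p a b).2 = !decide (Root p a = Root p b)) ∧
      (∀ z, Root (unionParent p a b).1 z =
        if Root p a ≠ Root p b ∧
            Root p z = (if sLt (Root p a) (Root p b) then Root p b else Root p a)
        then (if sLt (Root p a) (Root p b) then Root p a else Root p b)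
        else Root p z) := by
  have hsz : keysBelow p a < p.size + 1 := by have := keysBelow_le_size p a; omega
  obtain ⟨hva, hpa, hka, hra⟩ := findParent_spec (p.size + 1) p a hp ha hsz
  set p1 := (findParent (p.size + 1) p a).1 with hp1def
  have hca : ∀ k, p1.contains k = p.contains k := contains_congr_of_keys_eq p p1 hka
  have hsz1 : p1.size = p.size := by
    have h1 : p1.keys.length = p.keys.length := by rw [hka]
    simpa only [PySem.Dict.keys, PySem.Dict.size, List.length_map] using h1
  have hszb : keysBelow p1 b < p1.size + 1 := by have := keysBelow_le_size p1 b; omega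
  obtain ⟨hvb, hpb, hkb, hrb⟩ := findParent_spec (p1.size + 1) p1 b hpa (by rw [hca]; exact hb) hszb
  set p2 := (findParent (p1.size + 1) p1 b).1 with hp2def
  have hcb : ∀ k, p2.contains k = p1.contains k := contains_congr_of_keys_eq p1 p2 hkb
  have hr2 : ∀ z, Root p2 z = Root p z := fun z => by rw [hrb z, hra z]
  have hx2 : (findParent (p.size + 1) p a).2 = Root p a := hva
  have hy2 : (findParent (p1.size + 1) p1 b).2 = Root p b := by rw [hvb, hra b]
  have hu : unionParent p a b =
      (if Root p a = Root p b then (p2, false)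
       else if (Root p b).toList < (Root p a).toList then (p2.insert (Root p a) (Root p b), true)
       else if (Root p a).toList < (Root p b).toList then (p2.insert (Root p b) (Root p a), true)
       else (p2, true)) := by
    simp only [unionParent, ← hp1def, ← hp2def, hx2, hy2]
  by_cases heq : Root p a = Root p b
  · rw [hu, if_pos heq]
    refine ⟨hpb, by rw [hkb, hka], by simp [heq], fun z => ?_⟩
    rw [if_neg (by simp [heq]), hr2 z]
  · have hca2 : p2.contains (Root p a) = true := by
      rw [hcb, hca]; exact Root_mem p hp a ha
    have hcb2 : p2.contains (Root p b) = true := by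
      rw [hcb, hca]; exact Root_mem p hp b hb
    have hfa : p2.getD (Root p a) (Root p a) = Root p a := by
      have := Root_fix p2 hpb a
      rwa [hr2 a] at this
    have hfb : p2.getD (Root p b) (Root p b) = Root p b := by
      have := Root_fix p2 hpb b
      rwa [hr2 b] at this
    by_cases hba : sLt (Root p b) (Root p a)
    · obtain ⟨hp3, hk3, hr3⟩ := insert_repoint_spec p2 hpb (Root p a) (Root p b)
        hca2 hcb2 hfa hfb hba
      have hab : ¬ sLt (Root p a) (Root p b) := lt_asymm hba
      rw [hu, if_neg heq, if_pos hba]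
      refine ⟨hp3, by rw [hk3, hkb, hka], by simp [heq], fun z => ?_⟩
      rw [hr3 z, hr2 z]
      simp only [if_neg hab, heq, ne_eq, not_false_iff, true_and]
    · have hab : sLt (Root p a) (Root p b) := by
        rcases lt_trichotomy (Root p a).toList (Root p b).toList with h | h | h
        · exact h
        · exact absurd (String.toList_inj.mp h) heq
        · exact absurd h hba
      obtain ⟨hp3, hk3, hr3⟩ := insert_repoint_spec p2 hpb (Root p b) (Root p a)
        hcb2 hca2 hfb hfa hab
      rw [hu, if_neg heq, if_neg hba, if_pos hab]
      refine ⟨hp3, by rw [hk3, hkb, hka], by simp [heq], fun z => ?_⟩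
      rw [hr3 z, hr2 z]
      simp only [if_pos hab, heq, ne_eq, not_false_iff, true_and]

-- relational invariant between A's parent forest and B's representative map
def RInv (p : PySem.Dict String String) (rep : PySem.Dict String String) : Prop :=
  rep.keys.Nodup ∧ (∀ k, k ∈ rep.keys → p.contains k = true) ∧
    (∀ k v, rep.get? k = some v → v ∈ rep.keys) ∧
    (∀ z, Root p z = rep.getD z z)

theorem get?_mapVals (l : List (String × String)) (f : String → String) (k : String) :
    (PySem.Dict.mk (l.map (fun kv => (kv.1, f kv.2)))).get? k =
      ((PySem.Dict.mk l).get? k).map f := by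
  induction l with
  | nil => rfl
  | cons kv rest ih =>
    rw [List.map_cons]
    rcases kv with ⟨a, v⟩
    rw [PySem.Dict.get?_mk_cons, PySem.Dict.get?_mk_cons]
    by_cases h : a = k
    · simp [h]
    · simp [beq_eq_false_iff_ne.mpr h, ih]

theorem keys_mapVals (l : List (String × String)) (f : String → String) :
    (PySem.Dict.mk (l.map (fun kv => (kv.1, f kv.2)))).keys = (PySem.Dict.mk l).keys := by
  rw [PySem.Dict.keys_mk, PySem.Dict.keys_mk, List.map_map]
  rfl

theorem step_sim (p rep : PySem.Dict String String) (cA cB : Int)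
    (hp : PInv p) (hr : RInv p rep) (hc : cA = cB) (bi ai : String) :
    PInv (solutionStepA (p, cA) bi ai).1 ∧
      RInv (solutionStepA (p, cA) bi ai).1 (solutionStepB (rep, cB) bi ai).1 ∧
      (solutionStepA (p, cA) bi ai).2 = (solutionStepB (rep, cB) bi ai).2 := by
  subst hc
  obtain ⟨hnd, hks, hvk, hrz⟩ := hr
  have phase1 : ∀ (q : PySem.Dict String String), PInv q → (∀ z, Root q z = Root p z) →
      ∀ e, PInv (if q.contains e then q else q.insert e e) ∧
        (∀ z, Root (if q.contains e then q else q.insert e e) z = Root p z) ∧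
        (if q.contains e then q else q.insert e e).contains e = true ∧
        (∀ k, q.contains k = true →
          (if q.contains e then q else q.insert e e).contains k = true) := by
    intro q hq hqr e
    by_cases hcq : q.contains e = true
    · rw [if_pos hcq]
      exact ⟨hq, hqr, hcq, fun k h => h⟩
    · have hcq' : q.contains e = false := by simpa using hcq
      obtain ⟨hq', hroots'⟩ := insert_fresh_spec q hq e hcq'
      rw [if_neg hcq]
      refine ⟨hq', fun z => by rw [hroots' z, hqr z], ?_, ?_⟩
      · rw [PySem.Dict.contains_insert]; simp
      · intro k hk
        rw [PySem.Dict.contains_insert, hk, Bool.or_true]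
  obtain ⟨hp1, hr1, hcb1, hmono1⟩ := phase1 p hp (fun z => rfl) bi
  obtain ⟨hp2, hr2a, hca2, hmono2⟩ :=
    phase1 (if p.contains bi then p else p.insert bi bi) hp1 hr1 ai
  have hcb2 := hmono2 bi hcb1
  by_cases hba : bi = ai
  · -- equal pair: A inserts singletons and continues, B skips; counts unchanged
    rw [show solutionStepA (p, cA) bi ai =
        ((if (if p.contains bi then p else p.insert bi bi).contains ai
            then (if p.contains bi then p else p.insert bi bi)
            else (if p.contains bi then p else p.insert bi bi).insert ai ai), cA) from by
          simp only [solutionStepA, if_pos hba],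
      show solutionStepB (rep, cA) bi ai = (rep, cA) from by
          simp only [solutionStepB, if_pos hba]]
    exact ⟨hp2, ⟨hnd, fun k hk => hmono2 k (hmono1 k (hks k hk)), hvk,
      fun z => by rw [hr2a z, hrz z]⟩, by trivial⟩
  · obtain ⟨hpu, hku, hbu, hru⟩ :=
      unionParent_spec (if (if p.contains bi then p else p.insert bi bi).contains ai
          then (if p.contains bi then p else p.insert bi bi)
          else (if p.contains bi then p else p.insert bi bi).insert ai ai) bi ai hp2 hcb2 hca2
    set p2 := (if (if p.contains bi then p else p.insert bi bi).contains ai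
          then (if p.contains bi then p else p.insert bi bi)
          else (if p.contains bi then p else p.insert bi bi).insert ai ai) with hp2def
    set u := unionParent p2 bi ai with hudef
    have hcu : ∀ k, u.1.contains k = p2.contains k := contains_congr_of_keys_eq p2 u.1 hku
    have hrbv : rep.getD bi bi = Root p2 bi := by rw [hr2a bi, hrz bi]
    have hrav : rep.getD ai ai = Root p2 ai := by rw [hr2a ai, hrz ai]
    have hA : solutionStepA (p, cA) bi ai = if u.2 then (u.1, cA + 1) else (u.1, cA + 2) := by
      simp only [solutionStepA, if_neg hba, ← hp2def, ← hudef]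
    by_cases heq : Root p2 bi = Root p2 ai
    · -- already same class: both add 2, B's map unchanged
      have hB : solutionStepB (rep, cA) bi ai = (rep, cA + 2) := by
        simp only [solutionStepB, if_neg hba]
        rw [if_pos (by rw [hrbv, hrav]; exact heq)]
      have hu2 : u.2 = false := by rw [hudef, hbu]; simp [heq]
      rw [hA, hB, hu2]
      simp only [Bool.false_eq_true, if_false]
      refine ⟨hpu, ⟨hnd, fun k hk => by rw [hcu]; exact hmono2 k (hmono1 k (hks k hk)), hvk,
        fun z => ?_⟩, by trivial⟩
      rw [hru z, if_neg (by simp [heq]), hr2a z, hrz z]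
    · -- merge: both add 1; B rewrites the hi-class to lo and records bi, ai
      have hu2 : u.2 = true := by rw [hudef, hbu]; simp [heq]
      have hrbra : rep.getD bi bi ≠ rep.getD ai ai := by rw [hrbv, hrav]; exact heq
      have hB : solutionStepB (rep, cA) bi ai =
          (((PySem.Dict.mk (rep.items.map (fun kv =>
              (kv.1, if kv.2 = (if (rep.getD bi bi).toList < (rep.getD ai ai).toList
                  then rep.getD ai ai else rep.getD bi bi)
                then (if (rep.getD bi bi).toList < (rep.getD ai ai).toList
                  then rep.getD bi bi else rep.getD ai ai) else kv.2)))).insert bi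
              (if (rep.getD bi bi).toList < (rep.getD ai ai).toList
                then rep.getD bi bi else rep.getD ai ai)).insert ai
              (if (rep.getD bi bi).toList < (rep.getD ai ai).toList
                then rep.getD bi bi else rep.getD ai ai), cA + 1) := by
        simp only [solutionStepB, if_neg hba, if_neg hrbra]
      set lo := (if (rep.getD bi bi).toList < (rep.getD ai ai).toList
        then rep.getD bi bi else rep.getD ai ai) with hlodef
      set hi := (if (rep.getD bi bi).toList < (rep.getD ai ai).toList
        then rep.getD ai ai else rep.getD bi bi) with hhidef
      set rep' := ((PySem.Dict.mk (rep.items.map (fun kv =>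
        (kv.1, if kv.2 = hi then lo else kv.2)))).insert bi lo).insert ai lo with hrepdef
      have hget' : ∀ z, rep'.get? z = if z = ai then some lo else if z = bi then some lo
          else (rep.get? z).map (fun v => if v = hi then lo else v) := by
        intro z
        rw [hrepdef, PySem.Dict.get?_insert, PySem.Dict.get?_insert,
          show (PySem.Dict.mk (rep.items.map (fun kv =>
              (kv.1, if kv.2 = hi then lo else kv.2)))).get? z =
            (rep.get? z).map (fun v => if v = hi then lo else v) from
            get?_mapVals rep.items (fun v => if v = hi then lo else v) z]
      have hkeys' : ∀ z, z ∈ rep'.keys ↔ z = ai ∨ z = bi ∨ z ∈ rep.keys := by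
        intro z
        rw [hrepdef]
        rw [PySem.Dict.mem_keys_insert, PySem.Dict.mem_keys_insert]
        rw [show (PySem.Dict.mk (rep.items.map (fun kv =>
          (kv.1, if kv.2 = hi then lo else kv.2)))).keys = rep.keys from
          keys_mapVals rep.items (fun v => if v = hi then lo else v)]
      have hnd' : rep'.keys.Nodup := by
        rw [hrepdef]
        apply PySem.Dict.nodup_keys_insert
        apply PySem.Dict.nodup_keys_insert
        rw [show (PySem.Dict.mk (rep.items.map (fun kv =>
          (kv.1, if kv.2 = hi then lo else kv.2)))).keys = rep.keys from
          keys_mapVals rep.items (fun v => if v = hi then lo else v)]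
        exact hnd
      have hmemD : ∀ e, rep.getD e e ∈ rep.keys ∨ rep.getD e e = e := by
        intro e
        rcases hg : rep.get? e with _ | v
        · right; rw [PySem.Dict.getD_eq_get?_getD, hg]; rfl
        · left; rw [PySem.Dict.getD_eq_get?_getD, hg]; exact hvk e v hg
      have hlomem : lo ∈ rep'.keys := by
        rw [hkeys' lo, hlodef]
        split
        · rcases hmemD bi with h | h
          · right; right; exact h
          · right; left; exact h
        · rcases hmemD ai with h | h
          · right; right; exact h
          · left; exact h
      have hhimem : hi = ai ∨ hi = bi ∨ hi ∈ rep.keys := by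
        rw [hhidef]
        split
        · rcases hmemD ai with h | h
          · right; right; exact h
          · left; exact h
        · rcases hmemD bi with h | h
          · right; right; exact h
          · right; left; exact h
      rw [hA, hB, hu2, if_pos rfl]
      refine ⟨hpu, ⟨hnd', ?_, ?_, ?_⟩, rfl⟩
      · -- every key of rep' is a key of A's parent
        intro k hk
        rw [hcu]
        rcases (hkeys' k).mp hk with h | h | h
        · rw [h]; exact hca2
        · rw [h]; exact hcb2
        · exact hmono2 k (hmono1 k (hks k h))
      · -- values of rep' are keys of rep'
        intro k v hg
        rw [hget' k] at hg
        by_cases hkai : k = ai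
        · rw [if_pos hkai] at hg
          obtain rfl : lo = v := by injection hg
          exact hlomem
        · rw [if_neg hkai] at hg
          by_cases hkbi : k = bi
          · rw [if_pos hkbi] at hg
            obtain rfl : lo = v := by injection hg
            exact hlomem
          · rw [if_neg hkbi] at hg
            obtain ⟨w, hw, hfw⟩ := Option.map_eq_some_iff.mp hg
            by_cases hwhi : w = hi
            · rw [if_pos hwhi] at hfw
              rw [← hfw]; exact hlomem
            · rw [if_neg hwhi] at hfw
              rw [← hfw]
              exact (hkeys' w).mpr (Or.inr (Or.inr (hvk k w hw)))
      · -- roots of A's merged forest equal B's representatives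
        intro z
        have hgd' : rep'.getD z z = if z = ai then lo else if z = bi then lo
            else (if rep.getD z z = hi then lo else rep.getD z z) := by
          rw [PySem.Dict.getD_eq_get?_getD, hget' z]
          by_cases h1 : z = ai
          · simp [h1]
          · rw [if_neg h1, if_neg h1]
            by_cases h2 : z = bi
            · simp [h2]
            · rw [if_neg h2, if_neg h2]
              rcases hg : rep.get? z with _ | w
              · have hz0 : rep.getD z z = z := by
                  rw [PySem.Dict.getD_eq_get?_getD, hg]; rfl
                have hzk : z ∉ rep.keys :=
                  (PySem.Dict.get?_eq_none_iff_not_mem_keys rep z).mp hg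
                have hzhi : z ≠ hi := by
                  rcases hhimem with h | h | h
                  · rw [h]; exact h1
                  · rw [h]; exact h2
                  · exact fun hc => hzk (hc ▸ h)
                rw [hz0, if_neg hzhi]
                rfl
              · rw [PySem.Dict.getD_eq_get?_getD, hg]
                rfl
        have hz2 : Root p2 z = rep.getD z z := by rw [hr2a z, hrz z]
        rw [hru z, ← hrbv, ← hrav, ← hhidef, ← hlodef, hgd']
        by_cases hzh : Root p2 z = hi
        · rw [if_pos ⟨hrbra, hzh⟩]
          by_cases h1 : z = ai
          · rw [if_pos h1]
          · rw [if_neg h1]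
            by_cases h2 : z = bi
            · rw [if_pos h2]
            · rw [if_neg h2, if_pos (hz2 ▸ hzh)]
        · rw [if_neg (fun hc => hzh hc.2)]
          by_cases h1 : z = ai
          · rw [if_pos h1]
            by_cases hor : (rep.getD bi bi).toList < (rep.getD ai ai).toList
            · refine absurd ?_ hzh
              rw [h1, hhidef, if_pos hor]
              exact hrav.symm
            · rw [hlodef, if_neg hor, h1]
              exact hrav.symm
          · rw [if_neg h1]
            by_cases h2 : z = bi
            · rw [if_pos h2]
              by_cases hor : (rep.getD bi bi).toList < (rep.getD ai ai).toList
              · rw [hlodef, if_pos hor, h2]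
                exact hrbv.symm
              · refine absurd ?_ hzh
                rw [h2, hhidef, if_neg hor]
                exact hrbv.symm
            · rw [if_neg h2, if_neg (fun hc => hzh (hz2 ▸ hc)), hz2]

theorem fold_sim (pairs : List (String × String)) :
    ∀ (p rep : PySem.Dict String String) (cA cB : Int),
      PInv p → RInv p rep → cA = cB →
      (pairs.foldl (fun st q => solutionStepA st q.1 q.2) (p, cA)).2 =
        (pairs.foldl (fun st q => solutionStepB st q.1 q.2) (rep, cB)).2 := by
  induction pairs with
  | nil => intro p rep cA cB _ _ hc; exact hc
  | cons q rest ih =>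
    intro p rep cA cB hp hr hc
    obtain ⟨h1, h2, h3⟩ := step_sim p rep cA cB hp hr hc q.1 q.2
    rw [List.foldl_cons, List.foldl_cons,
      show solutionStepA (p, cA) q.1 q.2 =
        ((solutionStepA (p, cA) q.1 q.2).1, (solutionStepA (p, cA) q.1 q.2).2) from rfl,
      show solutionStepB (rep, cB) q.1 q.2 =
        ((solutionStepB (rep, cB) q.1 q.2).1, (solutionStepB (rep, cB) q.1 q.2).2) from rfl]
    exact ih _ _ _ _ h1 h2 h3

theorem foldl_range_eq_zip (bs : List String) :
    ∀ (as_ : List String) (init : PySem.Dict String String × Int),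
      bs.length ≤ as_.length →
      (List.range bs.length).foldl
        (fun st (i : Nat) => solutionStepA st (PySem.List.pyGetD bs (i : Int) "") (PySem.List.pyGetD as_ (i : Int) "")) init =
      (bs.zip as_).foldl (fun st q => solutionStepA st q.1 q.2) init := by
  have key : ∀ (bs as_ : List String) (init : PySem.Dict String String × Int),
      bs.length ≤ as_.length →
      (List.range bs.length).foldl
        (fun st i => solutionStepA st (bs.getD i "") (as_.getD i "")) init =
      (bs.zip as_).foldl (fun st q => solutionStepA st q.1 q.2) init := by
    intro bs
    induction bs with
    | nil => intro as_ init _; rfl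
    | cons b bs ih =>
      intro as_ init h
      rcases as_ with _ | ⟨a, as'⟩
      · simp at h
      · rw [show (b :: bs).length = bs.length + 1 from rfl, List.range_succ_eq_map,
          List.foldl_cons, List.foldl_map]
        simp only [List.getD_cons_succ, List.getD_cons_zero]
        rw [List.zip_cons_cons, List.foldl_cons]
        exact ih as' _ (by simpa using h)
  intro as_ init h
  have hfun : (fun (st : PySem.Dict String String × Int) (i : Nat) =>
        solutionStepA st (PySem.List.pyGetD bs (i : Int) "") (PySem.List.pyGetD as_ (i : Int) "")) =
      (fun st i => solutionStepA st (bs.getD i "") (as_.getD i "")) := by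
    funext st i
    rw [PySem.List.pyGetD_natCast, PySem.List.pyGetD_natCast]
  rw [hfun]
  exact key bs as_ init h

-- ===== VERDICT (by name: the statement is the Claim_ definition above) =====
theorem solution_spec : Claim_equal_solution := by
  intro before after _ hpre
  unfold Spec_solution solution solution_alt
  rw [foldl_range_eq_zip before after _ hpre]
  exact fold_sim _ _ _ _ _ ⟨by simp [PySem.Dict.keys_empty], by simp [PySem.Dict.get?_empty]⟩
    ⟨by simp [PySem.Dict.keys_empty], by simp [PySem.Dict.keys_empty],
     by simp [PySem.Dict.get?_empty], by intro z; simp [Root, rootF, PySem.Dict.getD_empty]⟩ rfl
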